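-- pv_equiv track=rewrite | github.com/rebeca-gimenez/leetcode | python-3-problems/1502.py | canMakeArithmeticProgression
-- ===== SOURCE A (Python) =====
-- def canMakeArithmeticProgression(arr):
--     if len(arr) < 2:
--         return True
--     else:
--         arr.sort()
--         dif = arr[1] - arr[0]
--         for index in range(len(arr)-1):
--             if arr[index] + dif != arr[index + 1]:
--                 return False
--         return True
-- ===== SOURCE B (Python) =====
-- def canMakeArithmeticProgression(arr):
--     n = len(arr)
--     if n < 2:
--         return True
--     lo = min(arr)
--     hi = max(arr)
--     if (hi - lo) % (n - 1) != 0: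
--         return False
--     step = (hi - lo) // (n - 1)
--     values = set(arr)
--     return all(lo + i * step in values for i in range(n))
-- ===== Notes on version B (the rewrite author's own statement) =====
-- stated objective: alternative
-- what changed: Replaces sort-then-scan-adjacent-differences with a single-pass min/max computation deriving the expected step and a set-membership check of every expected term (no sorting).
import Mathlib
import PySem

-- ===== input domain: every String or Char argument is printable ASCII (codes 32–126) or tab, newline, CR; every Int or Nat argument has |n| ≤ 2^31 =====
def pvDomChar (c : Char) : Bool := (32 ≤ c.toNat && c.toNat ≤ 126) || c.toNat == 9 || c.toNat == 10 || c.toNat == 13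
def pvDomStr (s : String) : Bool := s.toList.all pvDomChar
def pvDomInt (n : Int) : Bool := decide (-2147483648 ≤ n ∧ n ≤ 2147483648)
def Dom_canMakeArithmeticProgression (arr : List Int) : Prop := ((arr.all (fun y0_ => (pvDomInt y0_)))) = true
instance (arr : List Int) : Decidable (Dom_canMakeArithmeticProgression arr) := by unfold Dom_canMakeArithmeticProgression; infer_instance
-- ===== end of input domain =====

-- B replaces A's sort-and-adjacent-differences scan with a min/max-derived step and a set-membership
-- check of every expected term (a different, sort-free algorithm). A sorts its argument in place (a
-- caller-visible side effect B does not have); the equivalence proved here is about the RETURN value only.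

-- ===== PORT A =====
-- literal port of A: sort, dif = arr[1]-arr[0], scan adjacent pairs (the early-'return False' loop is the 'all' over the index range)
def canMakeArithmeticProgression (arr : List Int) : Bool :=
  if arr.length < 2 then true
  else
    let s := PySem.List.sorted arr (fun x => x)
    let dif := PySem.List.pyGetD s 1 0 - PySem.List.pyGetD s 0 0
    (PySem.List.pyRange 0 ((arr.length : Int) - 1)).all
      (fun i => PySem.List.pyGetD s i 0 + dif == PySem.List.pyGetD s (i + 1) 0)

-- ===== PORT B =====
-- literal port of Source B: n, min, max, divisibility test, step, set of values, all expected terms present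
def canMakeArithmeticProgression_alt (arr : List Int) : Bool :=
  let n : Int := arr.length
  if n < 2 then true
  else
    let lo := (PySem.List.min? arr (fun x => x)).getD 0
    let hi := (PySem.List.max? arr (fun x => x)).getD 0
    if PySem.Int.mod (hi - lo) (n - 1) != 0 then false
    else
      let step := PySem.Int.floordiv (hi - lo) (n - 1)
      let values := PySem.Set.ofList arr
      (PySem.List.pyRange 0 n).all (fun i => PySem.Set.contains values (lo + i * step))

-- ===== PRECONDITION & SPEC =====
def Spec_canMakeArithmeticProgression (arr : List Int) (out : Bool) : Prop := out = canMakeArithmeticProgression_alt arr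
instance (arr : List Int) (out : Bool) : Decidable (Spec_canMakeArithmeticProgression arr out) := by unfold Spec_canMakeArithmeticProgression; infer_instance

-- ===== CLAIM (what is proved, stated in full; the proofs are below) =====
def Claim_equal_canMakeArithmeticProgression : Prop := ∀ (arr : List Int), Dom_canMakeArithmeticProgression arr → Spec_canMakeArithmeticProgression arr (canMakeArithmeticProgression arr)

-- ===== LEMMAS AND PROOFS =====

-- A = true iff the sorted list has equal adjacent differences (its first difference)
theorem portA_iff (arr : List Int) (h2 : 2 ≤ arr.length) :
    canMakeArithmeticProgression arr = true ↔
      (∀ k : Nat, k + 1 < arr.length →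
        (PySem.List.sorted arr (fun x => x)).getD k 0 +
          ((PySem.List.sorted arr (fun x => x)).getD 1 0 - (PySem.List.sorted arr (fun x => x)).getD 0 0) =
        (PySem.List.sorted arr (fun x => x)).getD (k + 1) 0) := by
  unfold canMakeArithmeticProgression
  rw [if_neg (by omega)]
  simp only [List.all_eq_true, PySem.List.mem_pyRange_one, beq_iff_eq]
  constructor
  · intro h k hk
    have := h (k : Int) ⟨by positivity, by omega⟩
    rw [PySem.List.pyGetD_of_nonneg _ _ (by positivity),
        PySem.List.pyGetD_of_nonneg _ _ (show (0:Int) ≤ (k:Int) + 1 by positivity),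
        PySem.List.pyGetD_of_nonneg _ _ (by norm_num),
        PySem.List.pyGetD_of_nonneg _ _ (by norm_num)] at this
    simpa using this
  · intro h i ⟨h0, h1⟩
    rw [PySem.List.pyGetD_of_nonneg _ _ h0,
        PySem.List.pyGetD_of_nonneg _ _ (show (0:Int) ≤ i + 1 by omega),
        PySem.List.pyGetD_of_nonneg _ _ (by norm_num),
        PySem.List.pyGetD_of_nonneg _ _ (by norm_num)]
    have := h i.toNat (by omega)
    simpa [show (i + 1).toNat = i.toNat + 1 by omega] using this

-- B = true iff the divisibility test passes and every expected term is an element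
theorem portB_iff (arr : List Int) (h2 : 2 ≤ arr.length) (lo hi : Int)
    (hmin : PySem.List.min? arr (fun x => x) = some lo)
    (hmax : PySem.List.max? arr (fun x => x) = some hi) :
    canMakeArithmeticProgression_alt arr = true ↔
      (PySem.Int.mod (hi - lo) ((arr.length : Int) - 1) = 0 ∧
       ∀ i : Int, 0 ≤ i → i < (arr.length : Int) →
         lo + i * PySem.Int.floordiv (hi - lo) ((arr.length : Int) - 1) ∈ arr) := by
  unfold canMakeArithmeticProgression_alt
  rw [if_neg (by omega), hmin, hmax]
  simp only [Option.getD_some]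
  by_cases hm : PySem.Int.mod (hi - lo) ((arr.length : Int) - 1) = 0
  · rw [if_neg (by simp [hm])]
    simp only [List.all_eq_true, PySem.List.mem_pyRange_one]
    constructor
    · intro h
      refine ⟨hm, fun i h0 h1 => ?_⟩
      have := h i ⟨h0, h1⟩
      simpa [PySem.Set.contains, PySem.Set.mem_ofList] using this
    · intro ⟨_, h⟩ i ⟨h0, h1⟩
      simpa [PySem.Set.contains, PySem.Set.mem_ofList] using h i h0 h1
  · rw [if_pos (by simpa using hm)]
    simp [hm]

-- a ≤-sorted list is monotone in the index
theorem sorted_getD_mono (s : List Int) (hpair : s.Pairwise (· ≤ ·))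
    (j k : Nat) (hjk : j ≤ k) (hk : k < s.length) : s.getD j 0 ≤ s.getD k 0 := by
  rcases eq_or_lt_of_le hjk with rfl | hlt
  · exact le_refl _
  · rw [List.getD_eq_getElem _ _ (by omega), List.getD_eq_getElem _ _ hk]
    exact List.pairwise_iff_getElem.mp hpair j k (by omega) hk hlt

-- min of arr is the head of the sorted list, max is its last element
theorem min_max_getD (arr : List Int) (h2 : 2 ≤ arr.length) (lo hi : Int)
    (hmin : PySem.List.min? arr (fun x => x) = some lo)
    (hmax : PySem.List.max? arr (fun x => x) = some hi) :
    lo = (PySem.List.sorted arr (fun x => x)).getD 0 0 ∧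
    hi = (PySem.List.sorted arr (fun x => x)).getD (arr.length - 1) 0 := by
  set s := PySem.List.sorted arr (fun x => x) with hs
  have hlen : s.length = arr.length := PySem.List.length_sorted arr _ _
  have hperm : s.Perm arr := PySem.List.sorted_perm arr _ _
  have hpair : s.Pairwise (· ≤ ·) := PySem.List.sorted_pairwise arr (fun x => x)
  constructor
  · have hmem0 : s.getD 0 0 ∈ arr := by
      rw [← hperm.mem_iff, List.getD_eq_getElem _ _ (by omega)]
      exact List.getElem_mem _
    have hle : lo ≤ s.getD 0 0 := PySem.List.min?_isMin hmin _ hmem0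
    have hloS : lo ∈ s := hperm.mem_iff.mpr (PySem.List.min?_mem hmin)
    obtain ⟨j, hj, hjv⟩ := List.getElem_of_mem hloS
    have hge : s.getD 0 0 ≤ lo := by
      rw [← hjv, ← List.getD_eq_getElem _ _ hj]
      exact sorted_getD_mono s hpair 0 j (Nat.zero_le _) hj
    omega
  · have hmemL : s.getD (arr.length - 1) 0 ∈ arr := by
      rw [← hperm.mem_iff, List.getD_eq_getElem _ _ (by omega)]
      exact List.getElem_mem _
    have hle : s.getD (arr.length - 1) 0 ≤ hi := PySem.List.max?_isMax hmax _ hmemL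
    have hhiS : hi ∈ s := hperm.mem_iff.mpr (PySem.List.max?_mem hmax)
    obtain ⟨j, hj, hjv⟩ := List.getElem_of_mem hhiS
    have hge : hi ≤ s.getD (arr.length - 1) 0 := by
      rw [← hjv, ← List.getD_eq_getElem _ _ hj]
      exact sorted_getD_mono s hpair j (arr.length - 1) (by omega) (by omega)
    omega

-- closed form for a list with constant adjacent difference
theorem ap_closed_form (s : List Int) (d : Int)
    (hP : ∀ k : Nat, k + 1 < s.length → s.getD k 0 + d = s.getD (k + 1) 0) :
    ∀ k : Nat, k < s.length → s.getD k 0 = s.getD 0 0 + k * d := by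
  intro k
  induction k with
  | zero => intro _; simp
  | succ k ih =>
    intro hk
    have h1 := hP k (by omega)
    have h2 := ih (by omega)
    push_cast
    rw [← h1, h2]
    ring

-- FORWARD: A's adjacent-difference condition implies B's divisibility + membership condition
theorem forward_dir (arr : List Int) (h2 : 2 ≤ arr.length) (lo hi : Int)
    (hmin : PySem.List.min? arr (fun x => x) = some lo)
    (hmax : PySem.List.max? arr (fun x => x) = some hi)
    (hP : ∀ k : Nat, k + 1 < arr.length →
        (PySem.List.sorted arr (fun x => x)).getD k 0 +
          ((PySem.List.sorted arr (fun x => x)).getD 1 0 - (PySem.List.sorted arr (fun x => x)).getD 0 0) =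
        (PySem.List.sorted arr (fun x => x)).getD (k + 1) 0) :
    PySem.Int.mod (hi - lo) ((arr.length : Int) - 1) = 0 ∧
      ∀ i : Int, 0 ≤ i → i < (arr.length : Int) →
        lo + i * PySem.Int.floordiv (hi - lo) ((arr.length : Int) - 1) ∈ arr := by
  set s := PySem.List.sorted arr (fun x => x) with hs
  have hlen : s.length = arr.length := PySem.List.length_sorted arr _ _
  have hperm : s.Perm arr := PySem.List.sorted_perm arr _ _
  set d := s.getD 1 0 - s.getD 0 0 with hd
  have hcf : ∀ k : Nat, k < s.length → s.getD k 0 = s.getD 0 0 + k * d :=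
    ap_closed_form s d (by rw [hlen]; exact hP)
  obtain ⟨hlo, hhi⟩ := min_max_getD arr h2 lo hi hmin hmax
  have hdiff : hi - lo = ((arr.length : Int) - 1) * d := by
    rw [hlo, hhi, ← hs, hcf (arr.length - 1) (by omega)]
    push_cast [Nat.cast_sub (by omega : 1 ≤ arr.length)]
    ring
  have hm0 : ((arr.length : Int) - 1) ≠ 0 := by omega
  have hstep : PySem.Int.floordiv (hi - lo) ((arr.length : Int) - 1) = d := by
    rw [hdiff, PySem.Int.floordiv_eq_ediv_of_pos (by omega)]
    exact Int.mul_ediv_cancel_left _ hm0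
  refine ⟨(PySem.Int.mod_eq_zero_iff_dvd _ _).mpr ⟨d, hdiff⟩, fun i h0 h1 => ?_⟩
  rw [hstep]
  have : lo + i * d = s.getD i.toNat 0 := by
    rw [hcf i.toNat (by omega), ← hlo]
    congr 1
    rw [Int.toNat_of_nonneg h0]
  rw [this, ← hperm.mem_iff, List.getD_eq_getElem _ _ (by omega)]
  exact List.getElem_mem _

-- BACKWARD: B's condition implies A's adjacent-difference condition
theorem backward_dir (arr : List Int) (h2 : 2 ≤ arr.length) (lo hi : Int)
    (hmin : PySem.List.min? arr (fun x => x) = some lo)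
    (hmax : PySem.List.max? arr (fun x => x) = some hi)
    (hm : PySem.Int.mod (hi - lo) ((arr.length : Int) - 1) = 0)
    (hmem : ∀ i : Int, 0 ≤ i → i < (arr.length : Int) →
        lo + i * PySem.Int.floordiv (hi - lo) ((arr.length : Int) - 1) ∈ arr) :
    ∀ k : Nat, k + 1 < arr.length →
        (PySem.List.sorted arr (fun x => x)).getD k 0 +
          ((PySem.List.sorted arr (fun x => x)).getD 1 0 - (PySem.List.sorted arr (fun x => x)).getD 0 0) =
        (PySem.List.sorted arr (fun x => x)).getD (k + 1) 0 := by
  set s := PySem.List.sorted arr (fun x => x) with hs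
  have hlen : s.length = arr.length := PySem.List.length_sorted arr _ _
  have hperm : s.Perm arr := PySem.List.sorted_perm arr _ _
  obtain ⟨c, hc⟩ := (PySem.Int.mod_eq_zero_iff_dvd _ _).mp hm
  have hm0 : (0:Int) < (arr.length : Int) - 1 := by
    have : (2:Int) ≤ (arr.length : Int) := by exact_mod_cast h2
    omega
  have hstep : PySem.Int.floordiv (hi - lo) ((arr.length : Int) - 1) = c := by
    rw [hc, PySem.Int.floordiv_eq_ediv_of_pos hm0]
    exact Int.mul_ediv_cancel_left _ (by omega)
  rw [hstep] at hmem
  have hlole : lo ≤ hi := PySem.List.min?_isMin hmin _ (PySem.List.max?_mem hmax)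
  by_cases hlh : lo = hi
  · -- min = max: every element equals lo, both sides are lo
    have hall : ∀ x ∈ arr, x = lo := fun x hx =>
      le_antisymm (hlh ▸ PySem.List.max?_isMax hmax _ hx) (PySem.List.min?_isMin hmin _ hx)
    have hgetD : ∀ k : Nat, k < arr.length → s.getD k 0 = lo := by
      intro k hk
      apply hall
      rw [← hperm.mem_iff, List.getD_eq_getElem _ _ (by omega)]
      exact List.getElem_mem _
    intro k hk
    rw [hgetD k (by omega), hgetD (k+1) hk, hgetD 1 (by omega), hgetD 0 (by omega)]
    ring
  · -- min < max: the n distinct expected terms all occur, so arr is a permutation of them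
    have hlt : lo < hi := lt_of_le_of_ne hlole hlh
    have hcpos : 0 < c := by nlinarith
    set E := (List.range arr.length).map (fun k : Nat => lo + (k:Int) * c) with hE
    have hElen : E.length = arr.length := by simp [hE]
    have hEget : ∀ k : Nat, k < arr.length → E.getD k 0 = lo + (k:Int) * c := by
      intro k hk
      rw [List.getD_eq_getElem _ _ (by omega)]
      simp [hE]
    have hEpair : E.Pairwise (· < ·) := by
      rw [List.pairwise_iff_getElem]
      intro i j hi' hj' hij
      simp only [hE, List.getElem_map, List.getElem_range]
      have : (i:Int) < (j:Int) := by exact_mod_cast hij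
      nlinarith
    have hEnodup : E.Nodup := hEpair.imp (fun h => ne_of_lt h)
    have hEsub : ∀ x ∈ E, x ∈ arr := by
      intro x hx
      simp only [hE, List.mem_map, List.mem_range] at hx
      obtain ⟨k, hk, rfl⟩ := hx
      exact hmem (k:Int) (by positivity) (by exact_mod_cast hk)
    have hsubF : E.toFinset ⊆ arr.toFinset := by
      intro x hx
      rw [List.mem_toFinset] at *
      exact hEsub x hx
    have hcardE : E.toFinset.card = arr.length := by
      rw [List.toFinset_card_of_nodup hEnodup, hElen]
    have hFeq : E.toFinset = arr.toFinset :=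
      Finset.eq_of_subset_of_card_le hsubF (by rw [hcardE]; exact List.toFinset_card_le arr)
    have hnodup_arr : arr.Nodup := by
      have hcarr : arr.toFinset.card = arr.length := by rw [← hFeq, hcardE]
      exact Multiset.toFinset_card_eq_card_iff_nodup.mp hcarr
    have hpermE : E.Perm arr := List.perm_of_nodup_nodup_toFinset_eq hEnodup hnodup_arr hFeq
    have hsE : s = E := PySem.List.sorted_eq_of_perm_of_pairwise_lt arr E (fun x => x) hpermE hEpair
    intro k hk
    rw [hsE, hEget k (by omega), hEget (k+1) hk, hEget 1 (by omega), hEget 0 (by omega)]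
    push_cast
    ring

theorem main_eq (arr : List Int) :
    canMakeArithmeticProgression arr = canMakeArithmeticProgression_alt arr := by
  by_cases h2 : arr.length < 2
  · have h2' : ((arr.length : Int)) < 2 := by exact_mod_cast h2
    simp [canMakeArithmeticProgression, canMakeArithmeticProgression_alt, h2, h2']
  · rw [not_lt] at h2
    have hne : arr ≠ [] := by intro h; subst h; simp at h2
    obtain ⟨lo, hmin⟩ : ∃ lo, PySem.List.min? arr (fun x => x) = some lo := by
      cases hm : PySem.List.min? arr (fun x => x) with
      | none => exact absurd ((PySem.List.min?_eq_none_iff arr (fun x => x)).mp hm) hne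
      | some v => exact ⟨v, rfl⟩
    obtain ⟨hi, hmax⟩ : ∃ hi, PySem.List.max? arr (fun x => x) = some hi := by
      cases hm : PySem.List.max? arr (fun x => x) with
      | none => exact absurd ((PySem.List.max?_eq_none_iff arr (fun x => x)).mp hm) hne
      | some v => exact ⟨v, rfl⟩
    rw [Bool.eq_iff_iff, portA_iff arr h2, portB_iff arr h2 lo hi hmin hmax]
    exact ⟨forward_dir arr h2 lo hi hmin hmax, fun ⟨hm, hmem⟩ => backward_dir arr h2 lo hi hmin hmax hm hmem⟩

-- ===== VERDICT (by name: the statement is the Claim_ definition above) =====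
theorem canMakeArithmeticProgression_spec : Claim_equal_canMakeArithmeticProgression := by
  intro arr _
  exact main_eq arr
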